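-- pv_equiv track=rewrite | github.com/FNA2003/grupo1-tp1-v1 | lexer/Modulos/operadoresRelacionales.py | afd_relation
-- ===== SOURCE A (Python) =====
-- def afd_relation(cadena:str) -> int:
--     """ r = > | < | = | >= | <= | <> """
--
--     estado_actual:int = 0
--     estados_aceptados:list[int] = [1,2,3]
--
--
--     for caracter in cadena:
--         if caracter == ">" and estado_actual == 0:
--             estado_actual = 1
--         elif caracter == "<" and estado_actual == 0:
--             estado_actual = 2
--         elif caracter == "=" and estado_actual == 0:
--             estado_actual = 3
--         elif caracter == "=" and estado_actual == 1:
--             estado_actual = 3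
--         elif (caracter == "=" or caracter == ">") and estado_actual == 2:
--             estado_actual = 3
--         else:
--             estado_actual = 4
--             break
--
--     # Devolvemos si la cadena fue aceptada
--     return (1 if estado_actual in estados_aceptados else 0)
-- ===== SOURCE B (Python) =====
-- def afd_relation(cadena: str) -> int:
--     return 1 if cadena in {">", "<", "=", ">=", "<=", "<>"} else 0
-- ===== Notes on version B (the rewrite author's own statement) =====
-- stated objective: simpler
-- what changed: Replaces the per-character DFA scan with a single membership test against the DFA's finite language, the six operator strings.
import Mathlib
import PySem

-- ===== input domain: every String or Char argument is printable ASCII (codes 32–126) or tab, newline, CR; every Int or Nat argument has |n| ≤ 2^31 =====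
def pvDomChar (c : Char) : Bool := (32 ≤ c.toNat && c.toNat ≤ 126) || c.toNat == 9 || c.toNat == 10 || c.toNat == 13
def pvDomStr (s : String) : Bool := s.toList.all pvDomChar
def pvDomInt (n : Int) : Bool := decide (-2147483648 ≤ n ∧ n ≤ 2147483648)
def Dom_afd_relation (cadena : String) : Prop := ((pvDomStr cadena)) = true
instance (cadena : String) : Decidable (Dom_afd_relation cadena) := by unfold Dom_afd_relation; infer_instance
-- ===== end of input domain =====

-- B replaces A's per-character DFA scan by a membership test in the DFA's finite language (six strings); simpler, same results.

-- ===== PORT A =====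
-- A's for-loop with break, as structural recursion over the characters with the same state.
def afd_relation_loop : List Char → Int → Int
  | [], estado_actual => estado_actual
  | caracter :: rest, estado_actual =>
    if caracter = '>' ∧ estado_actual = 0 then afd_relation_loop rest 1
    else if caracter = '<' ∧ estado_actual = 0 then afd_relation_loop rest 2
    else if caracter = '=' ∧ estado_actual = 0 then afd_relation_loop rest 3
    else if caracter = '=' ∧ estado_actual = 1 then afd_relation_loop rest 3
    else if (caracter = '=' ∨ caracter = '>') ∧ estado_actual = 2 then afd_relation_loop rest 3
    else 4  -- break: loop ends with estado_actual = 4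

def afd_relation (cadena : String) : Int :=
  let estado_actual : Int := afd_relation_loop cadena.toList 0
  if estado_actual ∈ ([1, 2, 3] : List Int) then 1 else 0

-- ===== PORT B =====
def afd_relation_alt (cadena : String) : Int :=
  if cadena ∈ ([">", "<", "=", ">=", "<=", "<>"] : List String) then 1 else 0

-- ===== PRECONDITION & SPEC =====
def Spec_afd_relation (cadena : String) (out : Int) : Prop := out = afd_relation_alt cadena
instance (cadena : String) (out : Int) : Decidable (Spec_afd_relation cadena out) := by unfold Spec_afd_relation; infer_instance

-- ===== CLAIM (what is proved, stated in full; the proofs are below) =====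
def Claim_equal_afd_relation : Prop := ∀ (cadena : String), Dom_afd_relation cadena → Spec_afd_relation cadena (afd_relation cadena)

-- ===== LEMMAS AND PROOFS =====
-- A's loop from state 0 accepts exactly the six operator strings (as char lists).
theorem afd_relation_list (l : List Char) :
    ((if afd_relation_loop l 0 ∈ ([1, 2, 3] : List Int) then 1 else 0 : Int)
      = if l = ['>'] ∨ l = ['<'] ∨ l = ['='] ∨ l = ['>', '='] ∨ l = ['<', '='] ∨ l = ['<', '>']
        then 1 else 0) := by
  match l with
  | [] => simp [afd_relation_loop]
  | [c] =>
    by_cases h1 : c = '>' <;> by_cases h2 : c = '<' <;> by_cases h3 : c = '=' <;>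
      simp_all [afd_relation_loop]
  | c :: d :: rest =>
    by_cases h1 : c = '>' <;> by_cases h2 : c = '<' <;> by_cases h3 : c = '=' <;>
      by_cases g1 : d = '>' <;> by_cases g2 : d = '=' <;>
      rcases rest with _ | ⟨e, rest⟩ <;>
      simp_all [afd_relation_loop]

-- ===== VERDICT (by name: the statement is the Claim_ definition above) =====
theorem afd_relation_spec : Claim_equal_afd_relation := by
  intro cadena _
  unfold Spec_afd_relation afd_relation afd_relation_alt
  rw [afd_relation_list]
  congr 1
  simp only [List.mem_cons, List.not_mem_nil, or_false,
    ← String.toList_inj]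
  rfl
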